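-- pv_equiv track=rewrite | github.com/makomaiza3213/Juego-Mempy | Trabajo/src/handlers/filter_lista.py | claves
-- ===== SOURCE A (Python) =====
-- def claves(lista, cuad):
--     """
--         Le asigna una elemento a cada boton del tablero
--     """
--     i = 0  # indice de la lista
--     dic = {'-F-': lista[i]}
--     for z in range(cuad - 1):  # cuad = filas * columas
--         i = i + 1
--         dic['-F-' + str(z)] = lista[i]
--         if i == (len(lista) - 1):
--             i = -1
--     return dic
-- ===== SOURCE B (Python) =====
-- def claves(lista, cuad):
--     """
--         Le asigna una elemento a cada boton del tablero
--     """
--     keys = ['-F-'] + ['-F-' + str(z) for z in range(cuad - 1)]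
--     reps = -(-len(keys) // len(lista))          # ceil(len(keys) / len(lista))
--     vals = (lista * reps)[:len(keys)]           # lista tiled cyclically, cut to one value per key
--     return dict(zip(keys, vals))
-- ===== Notes on version B (the rewrite author's own statement) =====
-- stated objective: alternative
-- what changed: B removes A's per-element index bookkeeping (the running counter with its conditional reset to -1) entirely: it precomputes the key list, builds the whole value sequence at once by repeating the list ceil(len(keys)/len(lista)) times and cutting it to len(keys), and pairs keys with values via dict(zip(...)).
-- crash fix: On a one-element lista with cuad >= 2, A raises IndexError (its index reaches 1 before the wraparound reset ever fires) while B returns the dict mapping every generated key to that single element. — e.g. on claves(["a"], 2): A raises IndexError, B returns [("-F-", "a"), ("-F-0", "a")]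
import Mathlib
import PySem

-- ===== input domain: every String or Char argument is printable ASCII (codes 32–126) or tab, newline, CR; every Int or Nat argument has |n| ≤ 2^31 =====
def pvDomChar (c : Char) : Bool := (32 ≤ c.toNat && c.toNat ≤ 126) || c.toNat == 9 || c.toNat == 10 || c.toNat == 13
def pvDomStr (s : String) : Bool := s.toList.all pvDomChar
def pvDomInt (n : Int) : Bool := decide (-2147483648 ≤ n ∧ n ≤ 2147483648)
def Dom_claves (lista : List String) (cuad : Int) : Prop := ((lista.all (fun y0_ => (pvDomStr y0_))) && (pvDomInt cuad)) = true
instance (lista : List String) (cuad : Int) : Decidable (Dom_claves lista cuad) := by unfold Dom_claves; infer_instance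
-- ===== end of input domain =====

-- B drops A's per-element index bookkeeping entirely: it tiles the list by repetition, cuts it to
-- one value per key, and zips keys with values (objective: alternative). Return values only; neither mutates.

-- ===== PORT A =====
-- one iteration of A's for-loop: state = some (i, dic), none = IndexError already raised
def clavesStepA (lista : List String) (st : Option (Int × PySem.Dict String String)) (z : Int) :
    Option (Int × PySem.Dict String String) :=
  match st with
  | none => none
  | some (i, dic) =>
    let j := i + 1                                   -- i = i + 1
    match PySem.List.pyGet? lista j with             -- lista[i]
    | none => none
    | some v =>
      some (if j = PySem.List.len lista - 1 then -1 else j,   -- if i == len(lista)-1: i = -1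
            PySem.Dict.insert dic ("-F-" ++ PySem.Int.toStr z) v)

def claves (lista : List String) (cuad : Int) : List (String × String) :=
  match PySem.List.pyGet? lista 0 with               -- dic = {'-F-': lista[i]}, i = 0
  | none => []                                       -- IndexError (outside Pre_)
  | some v0 =>
    match (PySem.List.pyRange 0 (cuad - 1) 1).foldl (clavesStepA lista)
        (some (0, PySem.Dict.insert PySem.Dict.empty "-F-" v0)) with
    | none => []                                     -- IndexError (outside Pre_)
    | some (_, dic) => dic.items

-- ===== PORT B =====
-- keys = ['-F-'] + ['-F-' + str(z) for z in range(cuad - 1)]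
def clavesKeys (cuad : Int) : List String :=
  "-F-" :: (PySem.List.pyRange 0 (cuad - 1) 1).map (fun z => "-F-" ++ PySem.Int.toStr z)

def claves_alt (lista : List String) (cuad : Int) : List (String × String) :=
  let keys := clavesKeys cuad
  match PySem.Int.floordiv? (-(keys.length : Int)) ((lista.length : Int)) with  -- -(-len(keys) // len(lista))
  | none => []                                       -- ZeroDivisionError (outside Pre_)
  | some q =>
    let vals := PySem.List.slice (PySem.List.pyRepeat lista (-q)) none (some ((keys.length : Int)))
                                                     -- (lista * reps)[:len(keys)]
    ((keys.zip vals).foldl (fun d p => PySem.Dict.insert d p.1 p.2) PySem.Dict.empty).items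
                                                     -- dict(zip(keys, vals))

-- ===== PRECONDITION & SPEC =====
-- Pre_ excludes exactly the inputs where A raises: an empty lista (IndexError on lista[0]),
-- and a one-element lista with cuad ≥ 2 (i reaches 1 before the wraparound reset ever fires).
def Pre_claves (lista : List String) (cuad : Int) : Prop :=
  lista ≠ [] ∧ (cuad ≤ 1 ∨ 2 ≤ (lista.length : Int))
instance (lista : List String) (cuad : Int) : Decidable (Pre_claves lista cuad) := by
  unfold Pre_claves; infer_instance

def pvWitness_claves : List String × Int := (["a", "b", "c"], 5)

-- On a one-element lista with cuad ≥ 2, A raises IndexError while B returns the dict mapping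
-- every generated key to that single element.
def Raises_claves (lista : List String) (cuad : Int) : Prop :=
  lista.length = 1 ∧ 2 ≤ cuad
instance (lista : List String) (cuad : Int) : Decidable (Raises_claves lista cuad) := by
  unfold Raises_claves; infer_instance
def pvRaiseWitness_claves : List String × Int := (["a"], 2)
def pvRaiseWitnessOut_claves : List (String × String) := [("-F-", "a"), ("-F-0", "a")]

def Spec_claves (lista : List String) (cuad : Int) (out : List (String × String)) : Prop := out = claves_alt lista cuad
instance (lista : List String) (cuad : Int) (out : List (String × String)) : Decidable (Spec_claves lista cuad out) := by unfold Spec_claves; infer_instance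

-- ===== CLAIM (what is proved, stated in full; the proofs are below) =====
def Claim_equal_claves : Prop := ∀ (lista : List String) (cuad : Int), Dom_claves lista cuad → Pre_claves lista cuad → Spec_claves lista cuad (claves lista cuad)
def Claim_raises_claves : Prop := (∀ (lista : List String) (cuad : Int), Dom_claves lista cuad → Raises_claves lista cuad → ¬ Pre_claves lista cuad) ∧ (Dom_claves (pvRaiseWitness_claves.1) (pvRaiseWitness_claves.2) ∧ Raises_claves (pvRaiseWitness_claves.1) (pvRaiseWitness_claves.2) ∧ claves_alt (pvRaiseWitness_claves.1) (pvRaiseWitness_claves.2) = pvRaiseWitnessOut_claves)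

-- ===== LEMMAS AND PROOFS =====

-- lista[j] for an in-range nonnegative j is getElem?
lemma pyGet?_of_in_range {α : Type} (xs : List α) (j : Int) (h0 : 0 ≤ j) (h1 : j < (xs.length : Int)) :
    PySem.List.pyGet? xs j = xs[j.toNat]? := by
  simp [PySem.List.pyGet?, PySem.List.pyIdx?, h0, h1]

-- stepping a modular index: wrap to 0 at n-1, else +1
lemma emod_succ (a n : Int) (hn : 2 ≤ n) :
    (a + 1) % n = if a % n = n - 1 then 0 else a % n + 1 := by
  have h1 : (1 : Int) % n = 1 := Int.emod_eq_of_lt (by omega) (by omega)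
  have h2 : (a + 1) % n = (a % n + 1) % n := by rw [Int.add_emod, h1]
  have hb := Int.emod_nonneg a (by omega : n ≠ 0)
  have hb2 := Int.emod_lt_of_pos a (by omega : (0:Int) < n)
  split_ifs with h
  · rw [h2, h, sub_add_cancel, Int.emod_self]
  · rw [h2, Int.emod_eq_of_lt (by omega) (by omega)]

-- A's loop, run with the invariant i + 1 = (z + 1) % n, builds the dict of the
-- modularly-indexed insertions in range order
lemma foldA_eq (lista : List String) (hn : 2 ≤ (lista.length : Int)) (b : Int) :
    ∀ (m : Nat) (z i : Int) (dic : PySem.Dict String String),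
      (b - z).toNat = m → 0 ≤ z → i + 1 = (z + 1) % (lista.length : Int) →
      ((PySem.List.pyRange z b 1).foldl (clavesStepA lista) (some (i, dic))).map Prod.snd
        = some ((PySem.List.pyRange z b 1).foldl
            (fun d zz => PySem.Dict.insert d ("-F-" ++ PySem.Int.toStr zz)
              (lista.getD ((zz + 1) % (lista.length : Int)).toNat "")) dic) := by
  intro m
  induction m with
  | zero =>
    intro z i dic hm hz hi
    rw [PySem.List.pyRange_one_eq_nil (by omega : b ≤ z)]
    simp
  | succ k ih =>
    intro z i dic hm hz hi
    have hzb : z < b := by omega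
    have hnpos : (0:Int) < (lista.length : Int) := by omega
    have hr1 : (0:Int) ≤ (z+1) % (lista.length:Int) := Int.emod_nonneg _ (by omega)
    have hr2 : (z+1) % (lista.length:Int) < (lista.length:Int) := Int.emod_lt_of_pos _ hnpos
    have hlt : (i+1).toNat < lista.length := by omega
    have hget : PySem.List.pyGet? lista (i + 1)
        = some (lista.getD ((z + 1) % (lista.length : Int)).toNat "") := by
      have hidx : (i+1).toNat = ((z + 1) % (lista.length : Int)).toNat := by omega
      rw [pyGet?_of_in_range lista (i+1) (by omega) (by omega), hidx,
          List.getElem?_eq_getElem (show ((z + 1) % (lista.length : Int)).toNat < lista.length by omega),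
          List.getD_eq_getElem lista "" (show ((z + 1) % (lista.length : Int)).toNat < lista.length by omega)]
    rw [PySem.List.pyRange_one_cons hzb]
    simp only [List.foldl_cons]
    have hstepA : clavesStepA lista (some (i, dic)) z =
        some (if i + 1 = PySem.List.len lista - 1 then -1 else i + 1,
              PySem.Dict.insert dic ("-F-" ++ PySem.Int.toStr z)
                (lista.getD ((z + 1) % (lista.length : Int)).toNat "")) := by
      simp [clavesStepA, hget]
    rw [hstepA]
    apply ih (z + 1) _ _ (by omega) (by omega)
    rw [PySem.List.len_eq]
    split_ifs with hreset
    · rw [emod_succ _ _ hn, if_pos (by omega)]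
      omega
    · rw [emod_succ _ _ hn, if_neg (by omega)]
      omega

-- element i of the r-fold tiling of xs is element i % len(xs)
lemma tile_getD {α : Type} (xs : List α) (d : α) :
    ∀ (r i : Nat), i < r * xs.length →
      ((List.replicate r xs).flatten).getD i d = xs.getD (i % xs.length) d := by
  intro r
  induction r with
  | zero => intro i h; simp at h
  | succ k ih =>
    intro i h
    rw [List.replicate_succ, List.flatten_cons]
    rcases Nat.lt_or_ge i xs.length with hlt | hlt
    · rw [List.getD_append _ _ _ _ hlt, Nat.mod_eq_of_lt hlt]
    · rw [List.getD_append_right _ _ _ _ hlt, Nat.mod_eq_sub_mod hlt]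
      refine ih (i - xs.length) ?_
      rw [Nat.succ_mul] at h
      omega

-- the tiled-and-cut value list, read off elementwise
lemma take_tile (lista : List String) (m r : Nat) (hm : m ≤ r * lista.length) :
    ((List.replicate r lista).flatten).take m
      = (List.range m).map (fun k => lista.getD (k % lista.length) "") := by
  have hlen : ((List.replicate r lista).flatten).length = r * lista.length := by
    simp [List.length_flatten]
  apply List.ext_getElem
  · simp [hlen, hm]
  · intro i h1 h2
    have hi : i < m := by simpa using h2
    rw [List.getElem_take,
        ← List.getD_eq_getElem ((List.replicate r lista).flatten) "" (by omega),
        tile_getD lista "" r i (by omega)]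
    simp

-- outside Pre_, A never reaches the region Raises_ describes
theorem claves_raises_disjoint :
    ∀ (lista : List String) (cuad : Int), Dom_claves lista cuad → Raises_claves lista cuad → ¬ Pre_claves lista cuad := by
  rintro lista cuad _ ⟨h1, h2⟩ ⟨hne, hcase⟩
  rcases hcase with h | h
  · omega
  · rw [h1] at h
    omega

-- ===== VERDICT (by name: the statements are the Claim_ definitions above) =====
theorem claves_spec : Claim_equal_claves := by
  intro lista cuad _ hpre
  obtain ⟨hne, hcase⟩ := hpre
  unfold Spec_claves claves claves_alt clavesKeys
  obtain ⟨x, xs, rfl⟩ : ∃ x xs, lista = x :: xs := by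
    cases lista with
    | nil => exact absurd rfl hne
    | cons x xs => exact ⟨x, xs, rfl⟩
  have h0 : PySem.List.pyGet? (x :: xs) 0 = some x := by
    simp [PySem.List.pyGet?, PySem.List.pyIdx?]
  simp only [h0]
  -- abbreviations: n = len(lista), t = number of loop keys, m = number of keys
  set n : Nat := (x :: xs).length with hn_def
  have hnpos : 0 < n := by simp [hn_def]
  set t : Nat := (cuad - 1).toNat with ht_def
  -- the key list has length t + 1
  have hklen : (("-F-" :: (PySem.List.pyRange 0 (cuad - 1) 1).map
      (fun z => "-F-" ++ PySem.Int.toStr z)).length : Int) = ((t + 1 : Nat) : Int) := by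
    simp [PySem.List.length_pyRange_one, ht_def]
  -- B side: the ceiling division succeeds with quotient q, reps = -q ≥ ⌈m/n⌉
  have hN0 : ((n : Nat) : Int) ≠ 0 := by exact_mod_cast Nat.pos_iff_ne_zero.mp hnpos
  simp only [hklen]
  have hdiv : PySem.Int.floordiv? (-((t + 1 : Nat) : Int)) ((n : Nat) : Int)
      = some (PySem.Int.floordiv (-((t + 1 : Nat) : Int)) ((n : Nat) : Int)) := by
    simp only [PySem.Int.floordiv?, PySem.Int.floordiv, if_neg hN0]
  simp only [hdiv]
  set q : Int := PySem.Int.floordiv (-((t + 1 : Nat) : Int)) ((n : Nat) : Int) with hq_def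
  have hbracket' := (PySem.Int.neg_floordiv_neg_eq_iff_of_pos
      (show (0:Int) < ((n : Nat) : Int) by exact_mod_cast hnpos)).mp
      (rfl : -PySem.Int.floordiv (-((t + 1 : Nat) : Int)) ((n : Nat) : Int) = -q)
  have hbracket := hbracket'
  rw [← hq_def] at hbracket
  have hqnonneg : 0 ≤ -q := by
    by_contra hc
    have h1 : (-q) * ((n : Nat) : Int) ≤ 0 :=
      mul_nonpos_of_nonpos_of_nonneg (by omega) (by positivity)
    have h2 : (0:Int) < ((t + 1 : Nat) : Int) := by positivity
    omega
  set r : Nat := (-q).toNat with hr_def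
  have hrq : ((r : Nat) : Int) = -q := Int.toNat_of_nonneg hqnonneg
  have hmrn : t + 1 ≤ r * n := by
    have : ((t + 1 : Nat) : Int) ≤ ((r * n : Nat) : Int) := by
      push_cast
      rw [hrq]
      exact hbracket.2
    exact_mod_cast this
  -- vals = [lista[k % n] for k in range(t+1)]
  have hrep : PySem.List.pyRepeat (x :: xs) (-q) = (List.replicate r (x :: xs)).flatten := rfl
  have hvals : PySem.List.slice (PySem.List.pyRepeat (x :: xs) (-q)) none (some ((t + 1 : Nat) : Int))
      = (List.range (t + 1)).map (fun k => (x :: xs).getD (k % n) "") := by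
    rw [hrep, PySem.List.slice_to_natCast, take_tile (x :: xs) (t + 1) r hmrn]
  rw [hvals]
  -- peel off the first key/value pair and turn the zip into one mapped range
  have hrangecons : List.range (t + 1) = 0 :: (List.range t).map Nat.succ :=
    List.range_succ_eq_map
  have hpyr : PySem.List.pyRange 0 (cuad - 1) 1 = (List.range t).map (fun k : Nat => (k : Int)) := by
    rw [ht_def]; exact PySem.List.pyRange_zero _
  have hz : ("-F-" :: (PySem.List.pyRange 0 (cuad - 1) 1).map (fun z => "-F-" ++ PySem.Int.toStr z)).zip
        ((List.range (t + 1)).map (fun k => (x :: xs).getD (k % n) ""))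
      = ("-F-", x) :: (List.range t).map
          (fun k : Nat => ("-F-" ++ PySem.Int.toStr (k : Int), (x :: xs).getD ((k + 1) % n) "")) := by
    rw [hrangecons, hpyr]
    simp only [List.map_cons, List.map_map, List.zip_cons_cons, List.zip_map']
    simp [Function.comp, Nat.zero_mod]
  rw [hz]
  simp only [List.foldl_cons, List.foldl_map]
  -- A side
  by_cases hc1 : cuad ≤ 1
  · -- loop body never runs: t = 0 on both sides
    have ht0 : t = 0 := by omega
    rw [PySem.List.pyRange_one_eq_nil (by omega : cuad - 1 ≤ 0), ht0]
    simp
  · -- cuad ≥ 2, hence n ≥ 2 by Pre_; run A's loop against the modular characterisation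
    have hn2 : 2 ≤ ((n : Nat) : Int) := by
      rcases hcase with h | h
      · omega
      · exact_mod_cast h
    have hinv : (0:Int) + 1 = ((0:Int) + 1) % ((n : Nat) : Int) := by
      rw [Int.emod_eq_of_lt (by omega) (by omega)]
    have hmain := foldA_eq (x :: xs) hn2 (cuad - 1) (cuad - 1 - 0).toNat 0 0
      (PySem.Dict.insert PySem.Dict.empty "-F-" x) rfl le_rfl hinv
    cases hfold : (PySem.List.pyRange 0 (cuad - 1) 1).foldl (clavesStepA (x :: xs))
        (some (0, PySem.Dict.insert PySem.Dict.empty "-F-" x)) with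
    | none =>
      rw [hfold] at hmain
      simp at hmain
    | some p =>
      rw [hfold] at hmain
      obtain ⟨i2, dic2⟩ := p
      simp only [Option.map_some] at hmain
      have hdic2 : dic2 = (PySem.List.pyRange 0 (cuad - 1) 1).foldl
          (fun d zz => PySem.Dict.insert d ("-F-" ++ PySem.Int.toStr zz)
            ((x :: xs).getD ((zz + 1) % ((n : Nat) : Int)).toNat "")) (PySem.Dict.insert PySem.Dict.empty "-F-" x) := by
        exact Option.some.inj hmain
      rw [hdic2, hpyr, List.foldl_map]
      congr 1

theorem claves_raises : Claim_raises_claves := by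
  unfold Claim_raises_claves
  exact ⟨claves_raises_disjoint, by decide, by decide, by decide⟩

-- self-check of the crash-fix witness: B's port returns pvRaiseWitnessOut_claves where A's Python raises
theorem claves_raises_witness_ok :
    claves_alt pvRaiseWitness_claves.1 pvRaiseWitness_claves.2 = pvRaiseWitnessOut_claves :=
  claves_raises.2.2.2
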